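-- pv_equiv track=rewrite | github.com/zhoubaohang/E2EMERN | data_loader.py | __parse_nen_tag
-- ===== SOURCE A (Python) =====
-- from typing import List, Dict
--
-- def __parse_nen_tag(nen_tag: List[str]) -> Dict:
--     """
--     parse the nen tag sequence to the dictionary
--     example:
--         [1,1,-1,-1] -> {
--             1: [(0,2)]
--         }
--     """
--     tmp = []
--     result = {}
--
--     for i in range(len(nen_tag)):
--         if nen_tag[i] != "O":
--             tmp.append(i)
--         else:
--             if len(tmp):
--                 cache = result.get(nen_tag[i], [])
--                 cache.append((tmp[0], len(tmp)))
--                 result[nen_tag[i - 1]] = cache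
--                 tmp.clear()
--
--     return result
-- ===== SOURCE B (Python) =====
-- from typing import List, Dict
--
-- def __parse_nen_tag(nen_tag: List[str]) -> Dict:
--     """Two-pointer scan: jump over each maximal non-'O' run at once;
--     a run is recorded only when an 'O' follows it (as in the original)."""
--     result = {}
--     n = len(nen_tag)
--     pos = 0
--     while pos < n:
--         if nen_tag[pos] == "O":
--             pos += 1
--         else:
--             end = pos + 1
--             while end < n and nen_tag[end] != "O":
--                 end += 1
--             if end < n:
--                 result[nen_tag[end - 1]] = [(pos, end - pos)]
--             pos = end
--     return result
-- ===== Notes on version B (the rewrite author's own statement) =====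
-- stated objective: alternative
-- what changed: Replaces the per-index state machine that accumulates an index list tmp and a dict .get/append/clear dance with a two-pointer scan that finds each maximal non-'O' run in one inner jump and records it with a single plain assignment when an 'O' follows.
import Mathlib
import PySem

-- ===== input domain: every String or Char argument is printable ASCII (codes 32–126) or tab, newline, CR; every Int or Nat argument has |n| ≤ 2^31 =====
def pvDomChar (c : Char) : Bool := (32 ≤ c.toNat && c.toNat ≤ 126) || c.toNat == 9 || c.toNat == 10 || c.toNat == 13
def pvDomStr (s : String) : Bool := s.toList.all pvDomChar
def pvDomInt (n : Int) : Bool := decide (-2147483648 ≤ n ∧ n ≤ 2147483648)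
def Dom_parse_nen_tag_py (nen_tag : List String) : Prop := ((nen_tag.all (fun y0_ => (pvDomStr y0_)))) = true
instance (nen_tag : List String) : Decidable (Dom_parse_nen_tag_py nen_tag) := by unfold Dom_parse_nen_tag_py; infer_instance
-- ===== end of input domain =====

-- B replaces A's per-index tmp-list state machine with a two-pointer scan over maximal
-- non-'O' runs (alternative decomposition, same O(n) cost).


-- ===== PORT A =====
-- loop body of A's 'for i in range(len(nen_tag))'; state = (tmp, result)
def aStep (nen_tag : List String)
    (st : List Int × PySem.Dict String (List (Int × Int))) (i : Int) :
    List Int × PySem.Dict String (List (Int × Int)) :=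
  if PySem.List.pyGetD nen_tag i "" ≠ "O" then
    (st.1 ++ [i], st.2)
  else if st.1.length ≠ 0 then
    -- cache = result.get(nen_tag[i], []); cache.append((tmp[0], len(tmp))); result[nen_tag[i-1]] = cache
    let cache := st.2.getD (PySem.List.pyGetD nen_tag i "") [] ++
      [(PySem.List.pyGetD st.1 0 0, (st.1.length : Int))]
    ([], st.2.insert (PySem.List.pyGetD nen_tag (i - 1) "") cache)
  else st

def parse_nen_tag_py (nen_tag : List String) : List (String × List (Int × Int)) :=
  ((PySem.List.pyRange 0 (nen_tag.length : Int) 1).foldl (aStep nen_tag)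
    ([], PySem.Dict.empty)).2.items

-- ===== PORT B =====
-- inner 'while end < n and nen_tag[end] != "O": end += 1'
def altEnd (nen_tag : List String) (e : Nat) : Nat :=
  if e < nen_tag.length ∧ nen_tag.getD e "" ≠ "O" then altEnd nen_tag (e + 1) else e
termination_by nen_tag.length - e
decreasing_by omega

theorem le_altEnd (nen_tag : List String) (e : Nat) : e ≤ altEnd nen_tag e := by
  unfold altEnd
  split
  · have := le_altEnd nen_tag (e + 1); omega
  · exact le_rfl
termination_by nen_tag.length - e
decreasing_by omega

-- outer 'while pos < n' of B
def altLoop (nen_tag : List String) (pos : Nat)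
    (d : PySem.Dict String (List (Int × Int))) : PySem.Dict String (List (Int × Int)) :=
  if pos < nen_tag.length then
    if nen_tag.getD pos "" = "O" then altLoop nen_tag (pos + 1) d
    else
      let e := altEnd nen_tag (pos + 1)
      if e < nen_tag.length then
        altLoop nen_tag e
          (d.insert (nen_tag.getD (e - 1) "") [((pos : Int), (e : Int) - (pos : Int))])
      else altLoop nen_tag e d
  else d
termination_by nen_tag.length - pos
decreasing_by
  · omega
  · have := le_altEnd nen_tag (pos + 1); omega
  · have := le_altEnd nen_tag (pos + 1); omega

def parse_nen_tag_py_alt (nen_tag : List String) : List (String × List (Int × Int)) :=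
  (altLoop nen_tag 0 PySem.Dict.empty).items

-- ===== PRECONDITION & SPEC =====
def Spec_parse_nen_tag_py (nen_tag : List String) (out : List (String × List (Int × Int))) : Prop := out = parse_nen_tag_py_alt nen_tag
instance (nen_tag : List String) (out : List (String × List (Int × Int))) : Decidable (Spec_parse_nen_tag_py nen_tag out) := by unfold Spec_parse_nen_tag_py; infer_instance

-- ===== CLAIM (what is proved, stated in full; the proofs are below) =====
def Claim_equal_parse_nen_tag_py : Prop := ∀ (nen_tag : List String), Dom_parse_nen_tag_py nen_tag → Spec_parse_nen_tag_py nen_tag (parse_nen_tag_py nen_tag)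

-- ===== LEMMAS AND PROOFS =====

theorem altEnd_le (nen_tag : List String) (e : Nat) (h : e ≤ nen_tag.length) :
    altEnd nen_tag e ≤ nen_tag.length := by
  rw [altEnd]
  by_cases hc : e < nen_tag.length ∧ nen_tag.getD e "" ≠ "O"
  · rw [if_pos hc]; exact altEnd_le nen_tag (e + 1) (by omega)
  · rw [if_neg hc]; exact h
termination_by nen_tag.length - e
decreasing_by omega

theorem altEnd_run (nen_tag : List String) (e j : Nat) (h1 : e ≤ j)
    (h2 : j < altEnd nen_tag e) : nen_tag.getD j "" ≠ "O" := by
  rw [altEnd] at h2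
  by_cases hc : e < nen_tag.length ∧ nen_tag.getD e "" ≠ "O"
  · rw [if_pos hc] at h2
    rcases Nat.eq_or_lt_of_le h1 with rfl | hlt
    · exact hc.2
    · exact altEnd_run nen_tag (e + 1) j hlt h2
  · rw [if_neg hc] at h2; omega
termination_by nen_tag.length - e
decreasing_by omega

theorem altEnd_stop (nen_tag : List String) (e : Nat)
    (h : altEnd nen_tag e < nen_tag.length) :
    nen_tag.getD (altEnd nen_tag e) "" = "O" := by
  rw [altEnd] at h ⊢
  by_cases hc : e < nen_tag.length ∧ nen_tag.getD e "" ≠ "O"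
  · rw [if_pos hc] at h ⊢; exact altEnd_stop nen_tag (e + 1) h
  · rw [if_neg hc] at h ⊢
    by_contra hO
    exact hc ⟨h, hO⟩
termination_by nen_tag.length - e
decreasing_by omega

-- folding A's step over a run of non-'O' indices just appends the indices to tmp
theorem run_fold (nen_tag : List String) (a b : Nat) (hab : a ≤ b)
    (hrun : ∀ j, a ≤ j → j < b → nen_tag.getD j "" ≠ "O")
    (tmp : List Int) (d : PySem.Dict String (List (Int × Int))) :
    (PySem.List.pyRange (a : Int) (b : Int) 1).foldl (aStep nen_tag) (tmp, d) =
      (tmp ++ PySem.List.pyRange (a : Int) (b : Int) 1, d) := by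
  rcases Nat.eq_or_lt_of_le hab with rfl | hlt
  · simp [PySem.List.pyRange_one_eq_nil]
  · rw [PySem.List.pyRange_one_cons (a := (a : Int)) (b := (b : Int)) (by exact_mod_cast hlt)]
    simp only [List.foldl_cons]
    have hne : PySem.List.pyGetD nen_tag (a : Int) "" ≠ "O" := by
      rw [PySem.List.pyGetD_natCast]; exact hrun a le_rfl hlt
    have hstep : aStep nen_tag (tmp, d) (a : Int) = (tmp ++ [(a : Int)], d) := by
      unfold aStep; rw [if_pos hne]
    rw [hstep]
    have hc : ((a : Int) + 1) = ((a + 1 : Nat) : Int) := by push_cast; ring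
    rw [hc, run_fold nen_tag (a + 1) b (by omega)
      (fun j h1 h2 => hrun j (by omega) h2) (tmp ++ [(a : Int)]) d]
    simp
termination_by b - a
decreasing_by omega

theorem main_loop (nen_tag : List String) (pos : Nat)
    (d : PySem.Dict String (List (Int × Int))) (hd : d.contains "O" = false) :
    ((PySem.List.pyRange (pos : Int) (nen_tag.length : Int) 1).foldl (aStep nen_tag)
      ([], d)).2 = altLoop nen_tag pos d := by
  by_cases hpos : pos < nen_tag.length
  · by_cases hO : nen_tag.getD pos "" = "O"
    · -- 'O' at pos: A's step leaves ([], d) unchanged, B skips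
      rw [PySem.List.pyRange_one_cons (a := (pos : Int)) (b := (nen_tag.length : Int))
        (by exact_mod_cast hpos)]
      simp only [List.foldl_cons]
      have hstep : aStep nen_tag ([], d) (pos : Int) = ([], d) := by
        unfold aStep
        rw [PySem.List.pyGetD_natCast, if_neg (not_not_intro hO)]
        simp
      rw [hstep]
      have hc : ((pos : Int) + 1) = ((pos + 1 : Nat) : Int) := by push_cast; ring
      rw [hc, main_loop nen_tag (pos + 1) d hd]
      conv_rhs => rw [altLoop]
      rw [if_pos hpos, if_pos hO]
    · -- non-'O' run from pos to e := altEnd (pos+1)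
      obtain ⟨e, he⟩ : ∃ e, altEnd nen_tag (pos + 1) = e := ⟨_, rfl⟩
      have hpe : pos + 1 ≤ e := he ▸ le_altEnd nen_tag (pos + 1)
      have hen : e ≤ nen_tag.length := he ▸ altEnd_le nen_tag (pos + 1) (by omega)
      have hrun : ∀ j, pos ≤ j → j < e → nen_tag.getD j "" ≠ "O" := by
        intro j h1 h2
        rcases Nat.eq_or_lt_of_le h1 with rfl | hlt
        · exact hO
        · exact altEnd_run nen_tag (pos + 1) j hlt (he ▸ h2)
      rw [PySem.List.pyRange_one_append (pos : Int) (e : Int) (nen_tag.length : Int)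
        (by exact_mod_cast (show pos ≤ e by omega)) (by exact_mod_cast hen),
        List.foldl_append,
        run_fold nen_tag pos e (by omega) hrun [] d]
      simp only [List.nil_append]
      have htmp_len : (PySem.List.pyRange (pos : Int) (e : Int) 1).length = e - pos := by
        rw [PySem.List.length_pyRange_one]; omega
      by_cases hlt : e < nen_tag.length
      · -- e is an 'O': A records the run exactly as B does
        have hstop : nen_tag.getD e "" = "O" := by
          rw [← he]; exact altEnd_stop nen_tag (pos + 1) (by rw [he]; exact hlt)
        have hkey : nen_tag.getD (e - 1) "" ≠ "O" := hrun (e - 1) (by omega) (by omega)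
        rw [PySem.List.pyRange_one_cons (a := (e : Int)) (b := (nen_tag.length : Int))
          (by exact_mod_cast hlt)]
        simp only [List.foldl_cons]
        have hstep : aStep nen_tag (PySem.List.pyRange (pos : Int) (e : Int) 1, d) (e : Int) =
            ([], d.insert (nen_tag.getD (e - 1) "")
              [((pos : Int), (e : Int) - (pos : Int))]) := by
          unfold aStep
          rw [PySem.List.pyGetD_natCast, if_neg (not_not_intro hstop),
            if_pos (by rw [htmp_len]; omega : ¬ (PySem.List.pyRange (pos : Int) (e : Int) 1).length = 0)]
          rw [hstop, PySem.Dict.getD_of_not_contains d [] hd]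
          have hidx : ((e : Int) - 1) = ((e - 1 : Nat) : Int) := by omega
          rw [hidx, PySem.List.pyGetD_natCast]
          have h0 : PySem.List.pyGetD (PySem.List.pyRange (pos : Int) (e : Int) 1) 0 0
              = (pos : Int) := by
            rw [PySem.List.pyRange_one_cons (a := (pos : Int)) (b := (e : Int))
              (by exact_mod_cast (show pos < e by omega))]
            exact PySem.List.pyGetD_zero_cons _ _ _
          rw [h0, htmp_len]
          have hsub : ((e - pos : Nat) : Int) = (e : Int) - (pos : Int) := by omega
          rw [hsub]
          simp
        rw [hstep]
        have hd' : (d.insert (nen_tag.getD (e - 1) "")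
            [((pos : Int), (e : Int) - (pos : Int))]).contains "O" = false := by
          rw [PySem.Dict.contains_insert]
          simp [hd]
          exact fun h => absurd h.symm hkey
        have hc : ((e : Int) + 1) = ((e + 1 : Nat) : Int) := by push_cast; ring
        rw [hc, main_loop nen_tag (e + 1) _ hd']
        conv_rhs => rw [altLoop]
        rw [if_pos hpos, if_neg hO]
        simp only [he, if_pos hlt]
        conv_rhs => rw [altLoop]
        rw [if_pos hlt, if_pos hstop]
      · -- trailing run: A never flushes tmp, B records nothing and stops
        have heq : e = nen_tag.length := by omega
        subst heq
        rw [PySem.List.pyRange_one_eq_nil le_rfl]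
        simp only [List.foldl_nil]
        conv_rhs => rw [altLoop]
        rw [if_pos hpos, if_neg hO]
        simp only [he, if_neg hlt]
        conv_rhs => rw [altLoop]
        rw [if_neg hlt]
  · rw [PySem.List.pyRange_one_eq_nil (by exact_mod_cast Nat.le_of_not_lt hpos)]
    rw [altLoop, if_neg hpos]
    simp
termination_by nen_tag.length - pos
decreasing_by
  · omega
  · omega

-- ===== VERDICT (by name: the statement is the Claim_ definition above) =====
theorem parse_nen_tag_py_spec : Claim_equal_parse_nen_tag_py := by
  intro nen_tag _
  unfold Spec_parse_nen_tag_py parse_nen_tag_py parse_nen_tag_py_alt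
  have h := main_loop nen_tag 0 PySem.Dict.empty (by simp [pysem])
  rw [Nat.cast_zero] at h
  rw [h]
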